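-- pv_equiv track=rewrite | github.com/omnivector-solutions/license-manager | agent/lm_agent/parsing/rlm.py | _get_start_offset
-- ===== SOURCE A (Python) =====
-- def _get_start_offset(lines) -> int:
--     """Get the start offset of the license data."""
--     i = len(lines) - 1
--     count = 0
--     for line in lines[::-1]:
--         if "-" * 10 in line:
--             count += 1
--         if count == 2:
--             break
--         i -= 1
--     return max(i, 0)
-- ===== SOURCE B (Python) =====
-- def _get_start_offset(lines) -> int:
--     """Get the start offset of the license data."""
--     marker = "-" * 10
--     indices = [i for i in range(len(lines)) if marker in lines[i]]
--     return indices[-2] if len(indices) >= 2 else 0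
-- ===== Notes on version B (the rewrite author's own statement) =====
-- stated objective: simpler
-- what changed: Replaces A's reverse scan with a decrementing counter and break by a forward index-table pass (all dashed-line indices) followed by selecting the second-to-last index, defaulting to 0.
import Mathlib
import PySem

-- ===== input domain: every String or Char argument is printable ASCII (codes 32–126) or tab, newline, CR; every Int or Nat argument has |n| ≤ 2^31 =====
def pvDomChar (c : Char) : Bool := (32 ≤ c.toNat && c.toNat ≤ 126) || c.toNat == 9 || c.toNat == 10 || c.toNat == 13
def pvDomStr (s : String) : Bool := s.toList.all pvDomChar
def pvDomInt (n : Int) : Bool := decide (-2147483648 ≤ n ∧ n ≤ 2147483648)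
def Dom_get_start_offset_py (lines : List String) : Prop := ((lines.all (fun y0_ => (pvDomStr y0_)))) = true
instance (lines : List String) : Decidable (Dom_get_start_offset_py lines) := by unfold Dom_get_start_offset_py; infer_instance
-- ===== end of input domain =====

-- B replaces A's reverse counter-scan-with-break by a forward index-table pass followed by
-- selecting the second-to-last dashed-line index (objective: simpler decomposition, same cost).


-- ===== PORT A =====
-- the 'for line in lines[::-1]: …' loop, carrying (i, count); the break and the fall-through
-- both end in 'return max(i, 0)'
def pvLoopA : List String → Int → Int → Int
  | [], i, _ => max i 0
  | line :: rest, i, count =>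
    let count' := if PySem.Str.isIn "----------" line then count + 1 else count
    if count' = 2 then max i 0 else pvLoopA rest (i - 1) count'

def get_start_offset_py (lines : List String) : Int :=
  pvLoopA ((PySem.List.slice? lines none none (-1)).getD []) (PySem.List.len lines - 1) 0

-- ===== PORT B =====
def get_start_offset_py_alt (lines : List String) : Int :=
  let indices := (PySem.List.pyRange 0 (PySem.List.len lines) 1).filter
      (fun i => PySem.Str.isIn "----------" ((PySem.List.pyGet? lines i).getD ""))
  if 2 ≤ indices.length then (PySem.List.pyGet? indices (-2)).getD 0 else 0

-- ===== PRECONDITION & SPEC =====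
def Spec_get_start_offset_py (lines : List String) (out : Int) : Prop := out = get_start_offset_py_alt lines
instance (lines : List String) (out : Int) : Decidable (Spec_get_start_offset_py lines out) := by unfold Spec_get_start_offset_py; infer_instance

-- ===== CLAIM (what is proved, stated in full; the proofs are below) =====
def Claim_equal_get_start_offset_py : Prop := ∀ (lines : List String), Dom_get_start_offset_py lines → Spec_get_start_offset_py lines (get_start_offset_py lines)

-- ===== LEMMAS AND PROOFS =====

-- the marker test both programs apply to a line
def pvP (l : String) : Bool := PySem.Str.isIn "----------" l
-- the list of marker indices B builds, in Nat form
def pvIdx (xs : List String) : List Nat := (List.range xs.length).filter (fun k => pvP (xs.getD k ""))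
-- number of steps of A's scan of the given (already reversed) list, starting at count = 0
def pvJ2 : List String → Nat
  | [] => 0
  | l :: rest => if pvP l then 1 + List.findIdx pvP rest else 1 + pvJ2 rest

theorem pvLoopA_cons (l : String) (rest : List String) (i count : Int) :
    pvLoopA (l :: rest) i count =
      (if (if pvP l then count + 1 else count) = 2 then max i 0
       else pvLoopA rest (i - 1) (if pvP l then count + 1 else count)) := rfl

theorem pvLoopA_one (L : List String) : ∀ i : Int, pvLoopA L i 1 = max (i - List.findIdx pvP L) 0 := by
  induction L with
  | nil => intro i; simp [pvLoopA]
  | cons l rest ih =>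
    intro i
    rw [pvLoopA_cons, List.findIdx_cons]
    by_cases h : pvP l <;> simp [h, ih] <;> omega

theorem pvLoopA_zero (L : List String) : ∀ i : Int, pvLoopA L i 0 = max (i - pvJ2 L) 0 := by
  induction L with
  | nil => intro i; simp [pvLoopA, pvJ2]
  | cons l rest ih =>
    intro i
    rw [pvLoopA_cons]
    by_cases h : pvP l <;> simp [pvJ2, h, ih, pvLoopA_one] <;> omega

theorem A_closed (lines : List String) :
    get_start_offset_py lines = max ((lines.length : Int) - 1 - pvJ2 lines.reverse) 0 := by
  unfold get_start_offset_py
  rw [PySem.List.slice?_none_none_neg_one]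
  simp only [Option.getD_some, PySem.List.len_eq]
  rw [pvLoopA_zero]

theorem B_closed (lines : List String) :
    get_start_offset_py_alt lines =
      (if 2 ≤ (pvIdx lines).length then (((pvIdx lines).getD ((pvIdx lines).length - 2) 0 : Nat) : Int) else 0) := by
  unfold get_start_offset_py_alt
  simp only [PySem.List.len_eq, PySem.List.pyRange_zero_natCast, List.filter_map]
  have hfilter : List.filter ((fun i => PySem.Str.isIn "----------" ((PySem.List.pyGet? lines i).getD "")) ∘ (fun k : Nat => (k : Int))) (List.range lines.length) = pvIdx lines := by
    unfold pvIdx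
    apply List.filter_congr
    intro k hk
    simp [PySem.List.pyGet?_natCast, pvP, List.getD_eq_getElem?_getD]
  rw [hfilter, List.length_map]
  by_cases h : 2 ≤ (pvIdx lines).length
  · have hlt : (pvIdx lines).length - 2 < (pvIdx lines).length := by omega
    rw [if_pos h, if_pos h]
    rw [PySem.List.pyGet?_neg_ofNat _ 2 (by norm_num) (by simpa using h)]
    rw [List.length_map, List.getElem?_map, List.getElem?_eq_getElem hlt]
    simp [List.getD_eq_getElem?_getD, List.getElem?_eq_getElem hlt]
  · rw [if_neg h, if_neg h]

theorem pvIdx_append (ys : List String) (r : String) :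
    pvIdx (ys ++ [r]) = pvIdx ys ++ (if pvP r then [ys.length] else []) := by
  unfold pvIdx
  have hlen : (ys ++ [r]).length = ys.length + 1 := by simp
  rw [hlen, List.range_succ, List.filter_append]
  have h1 : List.filter (fun k => pvP ((ys ++ [r]).getD k "")) (List.range ys.length) =
      List.filter (fun k => pvP (ys.getD k "")) (List.range ys.length) := by
    apply List.filter_congr
    intro k hk
    have hk' := List.mem_range.mp hk
    rw [List.getD_eq_getElem?_getD, List.getD_eq_getElem?_getD, List.getElem?_append_left hk']
  have h2 : List.filter (fun k => pvP ((ys ++ [r]).getD k "")) [ys.length] =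
      if pvP r then [ys.length] else [] := by
    have hgd : (ys ++ [r])[ys.length]?.getD "" = r := by
      rw [List.getElem?_append_right le_rfl]
      simp
    simp only [List.filter_cons, List.filter_nil, List.getD_eq_getElem?_getD, hgd]
  rw [h1, h2]

theorem pvIdx_nil_iff (ys : List String) : pvIdx ys = [] ↔ ∀ x ∈ ys, pvP x = false := by
  unfold pvIdx
  rw [List.filter_eq_nil_iff]
  constructor
  · intro h x hx
    obtain ⟨k, hk, rfl⟩ := List.mem_iff_getElem.mp hx
    have h2 := h k (List.mem_range.mpr hk)
    simp only [List.getD_eq_getElem?_getD, List.getElem?_eq_getElem hk, Option.getD_some] at h2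
    simpa using h2
  · intro h k hk
    have hk' := List.mem_range.mp hk
    simp only [List.getD_eq_getElem?_getD, List.getElem?_eq_getElem hk', Option.getD_some,
      Bool.not_eq_true]
    exact h _ (List.getElem_mem hk')

theorem pvFindIdx_lt (ys : List String) (h : pvIdx ys ≠ []) :
    List.findIdx pvP ys.reverse < ys.length := by
  have hx : ∃ x ∈ ys, pvP x = true := by
    by_contra hc
    refine h ((pvIdx_nil_iff ys).mpr (fun x hx => ?_))
    rcases Bool.eq_false_or_eq_true (pvP x) with hb | hb
    · exact absurd ⟨x, hx, hb⟩ hc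
    · exact hb
  obtain ⟨x, hx1, hx2⟩ := hx
  have := List.findIdx_lt_length.mpr ⟨x, List.mem_reverse.mpr hx1, hx2⟩
  simpa using this

theorem pvIdx_last (ys : List String) (h : pvIdx ys ≠ []) :
    (((pvIdx ys).getD ((pvIdx ys).length - 1) 0 : Nat) : Int) =
      (ys.length : Int) - 1 - List.findIdx pvP ys.reverse := by
  induction ys using List.reverseRecOn with
  | nil => simp [pvIdx] at h
  | append_singleton ys r ih =>
    have hrev : (ys ++ [r]).reverse = r :: ys.reverse := by simp
    rw [pvIdx_append] at h ⊢
    rw [hrev, List.findIdx_cons]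
    by_cases hr : pvP r
    · rw [if_pos hr] at h ⊢
      rw [List.getD_append_right _ _ _ _ (by simp)]
      simp [hr]
    · rw [if_neg hr] at h ⊢
      rw [List.append_nil] at h ⊢
      rw [ih h]
      simp [hr]
      ring

theorem main_eq (lines : List String) :
    max ((lines.length : Int) - 1 - pvJ2 lines.reverse) 0 =
      (if 2 ≤ (pvIdx lines).length then (((pvIdx lines).getD ((pvIdx lines).length - 2) 0 : Nat) : Int) else 0) := by
  induction lines using List.reverseRecOn with
  | nil => simp [pvIdx, pvJ2]
  | append_singleton ys r ih =>
    have hrev : (ys ++ [r]).reverse = r :: ys.reverse := by simp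
    have hlen : (ys ++ [r]).length = ys.length + 1 := by simp
    rw [hrev, hlen, pvIdx_append]
    by_cases hr : pvP r
    · rw [if_pos hr]
      rw [show pvJ2 (r :: ys.reverse) = 1 + List.findIdx pvP ys.reverse from by simp [pvJ2, hr]]
      by_cases hnil : pvIdx ys = []
      · -- at most one marker overall: both sides are 0
        have hall := (pvIdx_nil_iff ys).mp hnil
        have hfi : List.findIdx pvP ys.reverse = ys.reverse.length :=
          List.findIdx_eq_length.mpr (fun x hx => hall x (List.mem_reverse.mp hx))
        rw [hnil, hfi, List.nil_append, if_neg (by simp)]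
        rw [List.length_reverse]
        omega
      · have hpos : 1 ≤ (pvIdx ys).length := List.length_pos_iff.mpr hnil
        rw [if_pos (by simp; omega)]
        have hidx : (pvIdx ys ++ [ys.length]).length - 2 = (pvIdx ys).length - 1 := by
          simp
        rw [hidx, List.getD_append _ _ _ _ (by omega)]
        rw [pvIdx_last ys hnil]
        have hf := pvFindIdx_lt ys hnil
        omega
    · rw [if_neg hr, List.append_nil]
      rw [show pvJ2 (r :: ys.reverse) = 1 + pvJ2 ys.reverse from by simp [pvJ2, hr]]
      have harith : max (((ys.length + 1 : Nat) : Int) - 1 - ((1 + pvJ2 ys.reverse : Nat) : Int)) 0 =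
          max ((ys.length : Int) - 1 - (pvJ2 ys.reverse : Nat)) 0 := by
        congr 1
        push_cast
        ring
      rw [harith]
      exact ih

-- ===== VERDICT (by name: the statement is the Claim_ definition above) =====
theorem get_start_offset_py_spec : Claim_equal_get_start_offset_py := by
  intro lines _
  unfold Spec_get_start_offset_py
  rw [A_closed, B_closed, main_eq]
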